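-- pv_equiv track=rewrite | github.com/b3xul/Computational_Intelligence | lab1/Improved_lab1.py | initialize_sol
-- ===== SOURCE A (Python) =====
-- from collections import Counter, defaultdict
--
-- def initialize_sol(N, all_lists):
--     """Add to the initial state the lists that we already know will be part of the final solution since they are the
--     only ones that contain a certain number"""
--     initial_state = tuple()
--
--     # Build a dictionary using as key all numbers and as value a tuple of all the tuples that contain that number
--     tuples_containing_num = defaultdict(tuple)
--     for i, t in enumerate(all_lists):
--         for num in t:
--             tuples_containing_num[num] = (*tuples_containing_num[num], t)
--
--     for num in range(N):
--         if num not in tuples_containing_num: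
--             # No solutions exist for this N and these lists!
--             return None
--         if len(tuples_containing_num[num]) == 1:
--             initial_state = (*initial_state, *tuples_containing_num[num])
--
--     return initial_state
-- ===== SOURCE B (Python) =====
-- def initialize_sol(N, all_lists):
--     """Add to the initial state the lists that we already know will be part of the final solution since they are the
--     only ones that contain a certain number"""
--     initial_state = []
--     for num in range(N):
--         count = 0
--         holder = None
--         for t in all_lists:
--             k = t.count(num)
--             if k != 0:
--                 count += k
--                 holder = t
--         if count == 0:
--             # No solutions exist for this N and these lists!
--             return None
--         if count == 1:
--             initial_state.append(holder)
--     return tuple(initial_state)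
-- ===== Notes on version B (the rewrite author's own statement) =====
-- stated objective: alternative
-- what changed: B drops A's prebuilt num->lists index entirely: for each num in range(N) it scans all_lists once, summing occurrence multiplicities and remembering the last list that contains num, returning None on zero total and appending the single list on total 1.
import Mathlib
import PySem

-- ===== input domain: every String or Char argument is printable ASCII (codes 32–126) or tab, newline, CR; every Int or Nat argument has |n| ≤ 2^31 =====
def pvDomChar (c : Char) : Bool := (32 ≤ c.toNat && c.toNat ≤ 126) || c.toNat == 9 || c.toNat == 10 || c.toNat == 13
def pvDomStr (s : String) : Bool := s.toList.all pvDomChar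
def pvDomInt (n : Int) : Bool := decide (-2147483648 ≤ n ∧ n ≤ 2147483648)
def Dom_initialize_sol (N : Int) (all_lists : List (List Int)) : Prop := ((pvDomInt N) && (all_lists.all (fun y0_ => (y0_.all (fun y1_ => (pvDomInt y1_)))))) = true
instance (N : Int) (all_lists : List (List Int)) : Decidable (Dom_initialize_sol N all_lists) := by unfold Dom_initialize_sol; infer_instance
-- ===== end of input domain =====

-- B replaces A's prebuilt num->lists index by a per-num scan of all_lists (alternative decomposition; not claimed faster).

-- ===== PORT A =====
-- A-side helpers: the defaultdict(tuple) build, and the 'for num in range(N)' loop with its early 'return None'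
def pvBuild (all_lists : List (List Int)) : PySem.Dict Int (List (List Int)) :=
  all_lists.foldl
    (fun d t => t.foldl (fun d num => d.modify num [] (fun v => v ++ [t])) d)
    (PySem.Dict.empty : PySem.Dict Int (List (List Int)))

def pvALoop (d : PySem.Dict Int (List (List Int))) (N : Int) (num : Int) (st : List (List Int)) :
    Option (List (List Int)) :=
  if _h : num < N then
    if d.contains num = false then none
    else if (d.getD num []).length = 1 then pvALoop d N (num + 1) (st ++ d.getD num [])
    else pvALoop d N (num + 1) st
  else some st
termination_by (N - num).toNat
decreasing_by all_goals omega

def initialize_sol (N : Int) (all_lists : List (List Int)) : Option (List (List Int)) :=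
  pvALoop (pvBuild all_lists) N 0 []

-- ===== PORT B =====
-- B-side helper: the 'for num in range(N)' loop; each step scans all_lists once (count + last holder)
def pvBLoop (all_lists : List (List Int)) (N : Int) (num : Int) (st : List (List Int)) :
    Option (List (List Int)) :=
  if _h : num < N then
    let p := all_lists.foldl
      (fun p t =>
        let k := t.count num
        if (k : Int) ≠ 0 then (p.1 + (k : Int), some t) else p)
      ((0 : Int), (none : Option (List Int)))
    if p.1 = 0 then none
    else if p.1 = 1 then pvBLoop all_lists N (num + 1) (st ++ p.2.toList)
    else pvBLoop all_lists N (num + 1) st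
  else some st
termination_by (N - num).toNat
decreasing_by all_goals omega

def initialize_sol_alt (N : Int) (all_lists : List (List Int)) : Option (List (List Int)) :=
  pvBLoop all_lists N 0 []

-- ===== PRECONDITION & SPEC =====
def Spec_initialize_sol (N : Int) (all_lists : List (List Int)) (out : Option (List (List Int))) : Prop := out = initialize_sol_alt N all_lists
instance (N : Int) (all_lists : List (List Int)) (out : Option (List (List Int))) : Decidable (Spec_initialize_sol N all_lists out) := by unfold Spec_initialize_sol; infer_instance

-- ===== CLAIM (what is proved, stated in full; the proofs are below) =====
def Claim_equal_initialize_sol : Prop := ∀ (N : Int) (all_lists : List (List Int)), Dom_initialize_sol N all_lists → Spec_initialize_sol N all_lists (initialize_sol N all_lists)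

-- ===== LEMMAS AND PROOFS =====

-- the containers of num, with multiplicity, in A's insertion order
def pvOcc (ls : List (List Int)) (num : Int) : List (List Int) :=
  ls.flatMap (fun t => List.replicate (t.count num) t)

theorem pvOcc_cons (t : List Int) (ls : List (List Int)) (num : Int) :
    pvOcc (t :: ls) num = List.replicate (t.count num) t ++ pvOcc ls num := rfl

theorem pv_replicate_ne_nil {α : Type} (n : Nat) (a : α) (h : n ≠ 0) :
    List.replicate n a ≠ [] := by
  cases n with
  | zero => exact absurd rfl h
  | succ m => simp [List.replicate_succ]

-- inner dict loop: getD
theorem pv_inner_getD (l : List Int) (t : List Int) (c : Int)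
    (d : PySem.Dict Int (List (List Int))) :
    (l.foldl (fun d num => d.modify num [] (fun v => v ++ [t])) d).getD c []
      = d.getD c [] ++ List.replicate (l.count c) t := by
  induction l generalizing d with
  | nil => simp
  | cons a l ih =>
    simp only [List.foldl_cons, ih, PySem.Dict.getD_modify, List.count_cons]
    by_cases h : c = a
    · subst h; simp [List.replicate_succ, List.append_assoc]
    · have : (a == c) = false := by simp [Ne.symm h]
      simp [h, this]

-- inner dict loop: contains
theorem pv_inner_contains (l : List Int) (t : List Int) (c : Int)
    (d : PySem.Dict Int (List (List Int))) :
    (l.foldl (fun d num => d.modify num [] (fun v => v ++ [t])) d).contains c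
      = (decide (l.count c ≠ 0) || d.contains c) := by
  induction l generalizing d with
  | nil => simp
  | cons a l ih =>
    simp only [List.foldl_cons, ih, PySem.Dict.contains_modify, List.count_cons]
    by_cases h : c = a
    · subst h; simp
    · have hba : (a == c) = false := by simp [Ne.symm h]
      have hab : (c == a) = false := by simp [h]
      simp [hba, hab]

-- outer dict loop: getD
theorem pv_outer_getD (ls : List (List Int)) (c : Int)
    (d : PySem.Dict Int (List (List Int))) :
    (ls.foldl (fun d t => t.foldl (fun d num => d.modify num [] (fun v => v ++ [t])) d) d).getD c []
      = d.getD c [] ++ pvOcc ls c := by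
  induction ls generalizing d with
  | nil => simp [pvOcc]
  | cons t ls ih => simp [List.foldl_cons, ih, pv_inner_getD, pvOcc_cons, List.append_assoc]

-- outer dict loop: contains
theorem pv_outer_contains (ls : List (List Int)) (c : Int)
    (d : PySem.Dict Int (List (List Int))) :
    (ls.foldl (fun d t => t.foldl (fun d num => d.modify num [] (fun v => v ++ [t])) d) d).contains c
      = (decide (pvOcc ls c ≠ []) || d.contains c) := by
  induction ls generalizing d with
  | nil => simp [pvOcc]
  | cons t ls ih =>
    simp only [List.foldl_cons, ih, pv_inner_contains, pvOcc_cons]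
    by_cases h : t.count c = 0
    · simp [h]
    · simp [h, pv_replicate_ne_nil _ _ h]

-- B's inner scan
theorem pv_bscan (ls : List (List Int)) (num : Int) (c0 : Int) (h0 : Option (List Int)) :
    ls.foldl (fun p t => let k := t.count num; if (k : Int) ≠ 0 then (p.1 + (k : Int), some t) else p)
      (c0, h0)
      = (c0 + ((pvOcc ls num).length : Int),
         if pvOcc ls num = [] then h0 else (pvOcc ls num).getLast?) := by
  induction ls generalizing c0 h0 with
  | nil => simp [pvOcc]
  | cons t ls ih =>
    rw [List.foldl_cons]
    by_cases h : t.count num = 0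
    · have hinit : (let k := ((t.count num : Nat) : Int)
          if k ≠ 0 then ((c0, h0).1 + k, some t) else (c0, h0)) = (c0, h0) := by simp [h]
      rw [hinit, ih, pvOcc_cons, h]
      simp
    · have hinit : (let k := ((t.count num : Nat) : Int)
          if k ≠ 0 then ((c0, h0).1 + k, some t) else (c0, h0))
          = (c0 + ((t.count num : Nat) : Int), some t) := by simp [h]
      rw [hinit, ih, pvOcc_cons]
      have hrep : List.replicate (t.count num) t ≠ [] := pv_replicate_ne_nil _ _ h
      have happ : List.replicate (t.count num) t ++ pvOcc ls num ≠ [] := by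
        simp [List.append_eq_nil_iff, hrep]
      simp only [Prod.mk.injEq]
      constructor
      · simp [List.length_append]
        push_cast
        ring
      · rw [if_neg happ, List.getLast?_append]
        by_cases h2 : pvOcc ls num = []
        · rw [if_pos h2, h2]
          cases hn : t.count num with
          | zero => exact absurd hn h
          | succ m => simp [List.getLast?_replicate]
        · rw [if_neg h2]
          cases hg : (pvOcc ls num).getLast? with
          | none => exact absurd (List.getLast?_eq_none_iff.mp hg) h2
          | some x => simp

theorem pvBuild_getD (ls : List (List Int)) (c : Int) :
    (pvBuild ls).getD c [] = pvOcc ls c := by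
  unfold pvBuild; rw [pv_outer_getD]; simp

theorem pvBuild_contains (ls : List (List Int)) (c : Int) :
    (pvBuild ls).contains c = decide (pvOcc ls c ≠ []) := by
  unfold pvBuild; rw [pv_outer_contains]; simp

theorem pv_loop_eq (all_lists : List (List Int)) (N : Int) :
    ∀ (k : Nat) (num : Int) (st : List (List Int)), (N - num).toNat = k →
      pvALoop (pvBuild all_lists) N num st = pvBLoop all_lists N num st := by
  intro k
  induction k using Nat.strong_induction_on with
  | _ k ih =>
    intro num st hk
    rw [pvALoop, pvBLoop]
    by_cases h : num < N
    · rw [dif_pos h, dif_pos h, pvBuild_contains, pvBuild_getD, pv_bscan]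
      by_cases h0 : pvOcc all_lists num = []
      · simp [h0]
      · have hlen0 : ((pvOcc all_lists num).length : Int) ≠ 0 := by
          simp [List.length_eq_zero_iff, h0]
        by_cases h1 : (pvOcc all_lists num).length = 1
        · obtain ⟨x, hx⟩ := List.length_eq_one_iff.mp h1
          simp only [hx, h0, decide_not]
          simp
          exact ih ((N - (num + 1)).toNat) (by omega) (num + 1) _ rfl
        · have h1' : ((pvOcc all_lists num).length : Int) ≠ 1 := by
            intro hc
            exact h1 (by exact_mod_cast hc)
          simp only [h0, decide_not]
          simp [h0, h1, h1']
          exact ih ((N - (num + 1)).toNat) (by omega) (num + 1) _ rfl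
    · rw [dif_neg h, dif_neg h]

-- ===== VERDICT (by name: the statement is the Claim_ definition above) =====
theorem initialize_sol_spec : Claim_equal_initialize_sol := by
  intro N all_lists _
  unfold Spec_initialize_sol initialize_sol initialize_sol_alt
  exact pv_loop_eq all_lists N ((N - 0).toNat) 0 [] rfl
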